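-- pv_equiv track=rewrite | github.com/rubenhx/G-PROG | gen_griskproggt_clean_intervals.py | extract_intervals
-- ===== SOURCE A (Python) =====
-- def extract_intervals(dates, m, n, o, maxdiff=550):
--     def is_valid_interval(interval):
--         start_date = interval[0]
--         end_date = interval[-1]
--         return (end_date - start_date) // 365 >= m and (end_date - start_date) // 365 < n
--
--     intervals = {}
--     for i in range(len(dates)):
--         current_interval = [dates[i]]
--         for j in range(i + 1, len(dates)):
--             if dates[j] - current_interval[-1] <= maxdiff:
--                 current_interval.append(dates[j])
--             else:
--                 break
--             if len(current_interval) >= o and is_valid_interval(current_interval):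
--                 start_date = current_interval[0]
--                 if start_date in intervals:
--                     if len(current_interval) > len(intervals[start_date]):
--                         intervals[start_date] = current_interval.copy()
--                 else:
--                     intervals[start_date] = current_interval.copy()
--     return list(intervals.values())
-- ===== SOURCE B (Python) =====
-- def extract_intervals(dates, m, n, o, maxdiff=550):
--     L = len(dates)
--     # run_end[i] = last index reachable from i stepping while consecutive gap <= maxdiff
--     run_end = [0] * L
--     for i in range(L - 1, -1, -1):
--         if i + 1 < L and dates[i + 1] - dates[i] <= maxdiff:
--             run_end[i] = run_end[i + 1]
--         else:
--             run_end[i] = i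
--     intervals = {}
--     minlen = max(o, 2)
--     for i in range(L):
--         j = run_end[i]
--         best = -1
--         while j >= i + minlen - 1:
--             d = (dates[j] - dates[i]) // 365
--             if m <= d < n:
--                 best = j
--                 break
--             j -= 1
--         if best >= 0:
--             start = dates[i]
--             cur = intervals.get(start)
--             if cur is None or best - i + 1 > len(cur):
--                 intervals[start] = dates[i:best + 1]
--     return list(intervals.values())
-- ===== Notes on version B (the rewrite author's own statement) =====
-- stated objective: faster
-- what changed: A re-grows the interval element by element for every start index, re-validating and copying each prefix and overwriting the dict repeatedly; B precomputes maximal gap-run endpoints once (right-to-left), then for each start scans downward from its run end for the largest valid endpoint and records one slice, updating the dict at most once per start.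
import Mathlib
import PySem

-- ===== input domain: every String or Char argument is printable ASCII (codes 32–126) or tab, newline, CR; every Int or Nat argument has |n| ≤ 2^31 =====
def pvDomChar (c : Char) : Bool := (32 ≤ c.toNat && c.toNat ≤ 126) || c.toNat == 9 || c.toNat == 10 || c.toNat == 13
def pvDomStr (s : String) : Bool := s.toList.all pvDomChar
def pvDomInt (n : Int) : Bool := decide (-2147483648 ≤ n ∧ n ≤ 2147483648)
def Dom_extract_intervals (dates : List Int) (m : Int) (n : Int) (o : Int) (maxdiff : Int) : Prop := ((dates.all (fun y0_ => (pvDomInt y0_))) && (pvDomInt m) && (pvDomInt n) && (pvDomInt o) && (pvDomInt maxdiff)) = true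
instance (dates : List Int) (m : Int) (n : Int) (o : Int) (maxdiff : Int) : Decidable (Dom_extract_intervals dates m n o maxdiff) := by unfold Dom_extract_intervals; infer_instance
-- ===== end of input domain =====

-- B replaces A's quadratic rebuild-per-start inner loop by precomputed gap-run endpoints plus a
-- downward scan from the run end for the largest valid endpoint (objective: alternative/faster in
-- the common long-run case; return value proved identical on the whole domain).

-- ===== PORT A =====
-- is_valid_interval(interval): interval[0], interval[-1] (lists are nonempty wherever A calls it)
def pvValidA (m n : Int) (interval : List Int) : Bool :=
  decide (m ≤ PySem.Int.floordiv ((PySem.List.pyGet? interval (-1)).getD 0 - (PySem.List.pyGet? interval 0).getD 0) 365 ∧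
    PySem.Int.floordiv ((PySem.List.pyGet? interval (-1)).getD 0 - (PySem.List.pyGet? interval 0).getD 0) 365 < n)

-- the inner 'for j in range(i+1, len(dates))' loop with its break, threaded dict state
def pvInnerA (dates : List Int) (m : Int) (n : Int) (o : Int) (maxdiff : Int)
    (j : Nat) (cur : List Int) (d : PySem.Dict Int (List Int)) : PySem.Dict Int (List Int) :=
  if h : j < dates.length then
    if dates.getD j 0 - (PySem.List.pyGet? cur (-1)).getD 0 ≤ maxdiff then
      let cur' := cur ++ [dates.getD j 0]
      let d' :=
        if o ≤ (cur'.length : Int) ∧ pvValidA m n cur' = true then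
          let s := (PySem.List.pyGet? cur' 0).getD 0
          match d.get? s with
          | some v => if v.length < cur'.length then d.insert s cur' else d
          | none => d.insert s cur'
        else d
      pvInnerA dates m n o maxdiff (j+1) cur' d'
    else d
  else d
termination_by dates.length - j

def extract_intervals (dates : List Int) (m : Int) (n : Int) (o : Int) (maxdiff : Int) : List (List Int) :=
  ((List.range dates.length).foldl
    (fun d i => pvInnerA dates m n o maxdiff (i+1) [dates.getD i 0] d)
    PySem.Dict.empty).values

-- ===== PORT B =====
-- run_end[i] of Source B: the Python loop fills the array downward with run_end[i] computed from
-- run_end[i+1]; this recursion computes the same value for each index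
def pvRunEnd (dates : List Int) (maxdiff : Int) (i : Nat) : Nat :=
  if _h : i + 1 < dates.length ∧ dates.getD (i+1) 0 - dates.getD i 0 ≤ maxdiff then
    pvRunEnd dates maxdiff (i+1)
  else i
termination_by dates.length - i
decreasing_by omega

-- Source B's 'while j >= i + minlen - 1' downward scan; returns the found j (Python's best ≥ 0) or none (best = -1)
def pvScanB (dates : List Int) (m : Int) (n : Int) (i : Nat) (lb : Int) (j : Int) : Option Int :=
  if _h : lb ≤ j then
    if m ≤ PySem.Int.floordiv (dates.getD j.toNat 0 - dates.getD i 0) 365 ∧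
       PySem.Int.floordiv (dates.getD j.toNat 0 - dates.getD i 0) 365 < n
    then some j
    else pvScanB dates m n i lb (j - 1)
  else none
termination_by (j + 1 - lb).toNat
decreasing_by omega

def extract_intervals_alt (dates : List Int) (m : Int) (n : Int) (o : Int) (maxdiff : Int) : List (List Int) :=
  ((List.range dates.length).foldl
    (fun d i =>
      match pvScanB dates m n i ((i : Int) + max o 2 - 1) ((pvRunEnd dates maxdiff i : Nat) : Int) with
      | some j =>
        let start := dates.getD i 0
        let cand := PySem.List.slice dates (some (i : Int)) (some (j + 1))
        match d.get? start with
        | some v => if (v.length : Int) < j - (i : Int) + 1 then d.insert start cand else d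
        | none => d.insert start cand
      | none => d)
    PySem.Dict.empty).values

-- ===== PRECONDITION & SPEC =====
def Spec_extract_intervals (dates : List Int) (m : Int) (n : Int) (o : Int) (maxdiff : Int) (out : List (List Int)) : Prop := out = extract_intervals_alt dates m n o maxdiff
instance (dates : List Int) (m : Int) (n : Int) (o : Int) (maxdiff : Int) (out : List (List Int)) : Decidable (Spec_extract_intervals dates m n o maxdiff out) := by unfold Spec_extract_intervals; infer_instance

-- ===== CLAIM (what is proved, stated in full; the proofs are below) =====
def Claim_equal_extract_intervals : Prop := ∀ (dates : List Int) (m : Int) (n : Int) (o : Int) (maxdiff : Int), Dom_extract_intervals dates m n o maxdiff → Spec_extract_intervals dates m n o maxdiff (extract_intervals dates m n o maxdiff)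

-- ===== LEMMAS AND PROOFS =====

-- dates[i:j] for natural i ≤ j
def pvSliceN (dates : List Int) (i j : Nat) : List Int := (dates.drop i).take (j - i)

-- the largest endpoint j' ≥ j still chained (consecutive gaps ≤ maxdiff) whose interval [i..j'] is valid
def pvBestIn (dates : List Int) (m : Int) (n : Int) (o : Int) (maxdiff : Int) (i j : Nat) : Option Nat :=
  if _h : j < dates.length ∧ dates.getD j 0 - dates.getD (j-1) 0 ≤ maxdiff then
    match pvBestIn dates m n o maxdiff i (j+1) with
    | some j' => some j'
    | none =>
      if o ≤ ((j - i + 1 : Nat) : Int) ∧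
         m ≤ PySem.Int.floordiv (dates.getD j 0 - dates.getD i 0) 365 ∧
         PySem.Int.floordiv (dates.getD j 0 - dates.getD i 0) 365 < n
      then some j else none
  else none
termination_by dates.length - j
decreasing_by omega

-- the net effect of recording interval dates[i..j] under key dates[i] (keep the longer one)
def pvUpd (dates : List Int) (i j : Nat) (d : PySem.Dict Int (List Int)) : PySem.Dict Int (List Int) :=
  let c := pvSliceN dates i (j+1)
  match d.get? (dates.getD i 0) with
  | some v => if v.length < c.length then d.insert (dates.getD i 0) c else d
  | none => d.insert (dates.getD i 0) c

def pvApply (dates : List Int) (i : Nat) (d : PySem.Dict Int (List Int)) : Option Nat → PySem.Dict Int (List Int)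
  | none => d
  | some j => pvUpd dates i j d

lemma pvSliceN_len (dates : List Int) (i j : Nat) (hj : j ≤ dates.length) :
    (pvSliceN dates i j).length = j - i := by
  simp [pvSliceN]; omega

lemma pvSliceN_snoc (dates : List Int) (i j : Nat) (hij : i ≤ j) (hj : j < dates.length) :
    pvSliceN dates i j ++ [dates.getD j 0] = pvSliceN dates i (j+1) := by
  have h1 : j + 1 - i = (j - i) + 1 := by omega
  have h2 : i + (j - i) = j := by omega
  rw [pvSliceN, pvSliceN, h1, List.take_add_one, List.getElem?_drop, h2,
      List.getElem?_eq_getElem hj, List.getD_eq_getElem?_getD, List.getElem?_eq_getElem hj]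
  rfl

lemma pvSliceN_head (dates : List Int) (i j : Nat) (hij : i < j) (hj : j ≤ dates.length) :
    PySem.List.pyGet? (pvSliceN dates i j) 0 = some (dates.getD i 0) := by
  have hi : i < dates.length := by omega
  rw [PySem.List.pyGet?_zero, pvSliceN, List.getElem?_take_of_lt (by omega), List.getElem?_drop,
      Nat.add_zero, List.getElem?_eq_getElem hi, List.getD_eq_getElem?_getD,
      List.getElem?_eq_getElem hi]
  rfl

lemma pvSliceN_last (dates : List Int) (i j : Nat) (hij : i < j) (hj : j ≤ dates.length) :
    PySem.List.pyGet? (pvSliceN dates i j) (-1) = some (dates.getD (j-1) 0) := by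
  have hl : (pvSliceN dates i j).length = j - i := pvSliceN_len dates i j hj
  have hj1 : j - 1 < dates.length := by omega
  have h2 : i + (j - i - 1) = j - 1 := by omega
  rw [PySem.List.pyGet?_neg_one, List.getLast?_eq_getElem?, hl, pvSliceN,
      List.getElem?_take_of_lt (by omega), List.getElem?_drop, h2,
      List.getElem?_eq_getElem hj1, List.getD_eq_getElem?_getD, List.getElem?_eq_getElem hj1]
  rfl

lemma pvDict_insert_insert (d : PySem.Dict Int (List Int)) (k : Int) (v w : List Int) :
    (d.insert k v).insert k w = d.insert k w := by
  apply PySem.Dict.ext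
  by_cases hc : d.contains k
  · rw [PySem.Dict.items_insert_of_contains _ w (PySem.Dict.contains_insert_self d k v),
        PySem.Dict.items_insert_of_contains _ v hc,
        PySem.Dict.items_insert_of_contains _ w hc, List.map_map]
    refine List.map_congr_left (fun p hp => ?_)
    by_cases hpk : p.1 = k <;> simp [hpk]
  · rw [PySem.Dict.items_insert_of_contains _ w (PySem.Dict.contains_insert_self d k v),
        PySem.Dict.items_insert_of_not_contains _ v (by simpa using hc),
        PySem.Dict.items_insert_of_not_contains _ w (by simpa using hc),
        List.map_append]
    have h1 : ∀ p ∈ d.items, p.1 ≠ k := by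
      intro p hp he
      exact hc ((PySem.Dict.contains_iff_mem_keys d k).mpr (he ▸ PySem.Dict.mem_keys_of_mem_items d hp))
    congr 1
    · conv_rhs => rw [← List.map_id d.items]
      refine List.map_congr_left (fun p hp => ?_)
      simp [h1 p hp]
    · simp
lemma pvUpd_upd (dates : List Int) (d : PySem.Dict Int (List Int)) (i j j' : Nat)
    (hij : i ≤ j) (hjj' : j < j') (hj' : j' < dates.length) :
    pvUpd dates i j' (pvUpd dates i j d) = pvUpd dates i j' d := by
  have hlj : (pvSliceN dates i (j+1)).length = j + 1 - i := pvSliceN_len dates i (j+1) (by omega)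
  have hlj' : (pvSliceN dates i (j'+1)).length = j' + 1 - i := pvSliceN_len dates i (j'+1) (by omega)
  unfold pvUpd
  cases hg : d.get? (dates.getD i 0) with
  | some v =>
    by_cases hv : v.length < (pvSliceN dates i (j+1)).length
    · simp only [if_pos hv, PySem.Dict.get?_insert_self]
      have : (pvSliceN dates i (j+1)).length < (pvSliceN dates i (j'+1)).length := by omega
      rw [if_pos this, if_pos (by omega), pvDict_insert_insert]
    · simp only [hg, if_neg hv]
  | none =>
    simp only [PySem.Dict.get?_insert_self]
    rw [if_pos (by omega), pvDict_insert_insert]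

lemma pvBestIn_some (dates : List Int) (m n o maxdiff : Int) (i j j' : Nat)
    (h : pvBestIn dates m n o maxdiff i j = some j') : j ≤ j' ∧ j' < dates.length := by
  suffices H : ∀ fuel jj jj', dates.length - jj ≤ fuel →
      pvBestIn dates m n o maxdiff i jj = some jj' → jj ≤ jj' ∧ jj' < dates.length by
    exact H dates.length j j' (by omega) h
  intro fuel
  induction fuel with
  | zero =>
    intro jj jj' hf hb
    rw [pvBestIn] at hb
    rw [dif_neg (by omega)] at hb
    exact absurd hb (by simp)
  | succ f ih =>
    intro jj jj' hf hb
    rw [pvBestIn] at hb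
    by_cases hc : jj < dates.length ∧ dates.getD jj 0 - dates.getD (jj-1) 0 ≤ maxdiff
    · rw [dif_pos hc] at hb
      cases hr : pvBestIn dates m n o maxdiff i (jj+1) with
      | some x =>
        rw [hr] at hb
        obtain ⟨h1, h2⟩ := ih (jj+1) x (by omega) hr
        simp only [Option.some.injEq] at hb
        omega
      | none =>
        rw [hr] at hb
        by_cases hok : o ≤ ((jj - i + 1 : Nat) : Int) ∧
            m ≤ PySem.Int.floordiv (dates.getD jj 0 - dates.getD i 0) 365 ∧
            PySem.Int.floordiv (dates.getD jj 0 - dates.getD i 0) 365 < n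
        · rw [if_pos hok] at hb
          simp only [Option.some.injEq] at hb
          omega
        · rw [if_neg hok] at hb
          exact absurd hb (by simp)
    · rw [dif_neg hc] at hb
      exact absurd hb (by simp)
lemma pvInnerA_eq (dates : List Int) (m n o maxdiff : Int) (i : Nat) :
    ∀ j (d : PySem.Dict Int (List Int)), i < j → j ≤ dates.length →
    pvInnerA dates m n o maxdiff j (pvSliceN dates i j) d
      = pvApply dates i d (pvBestIn dates m n o maxdiff i j) := by
  suffices H : ∀ fuel j d, i < j → j ≤ dates.length → dates.length - j ≤ fuel →
      pvInnerA dates m n o maxdiff j (pvSliceN dates i j) d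
        = pvApply dates i d (pvBestIn dates m n o maxdiff i j) by
    exact fun j d h1 h2 => H dates.length j d h1 h2 (by omega)
  intro fuel
  induction fuel with
  | zero =>
    intro j d hij hjL hf
    rw [pvInnerA, dif_neg (by omega), pvBestIn, dif_neg (by omega)]
    rfl
  | succ f ih =>
    intro j d hij hjL hf
    by_cases hjlt : j < dates.length
    case neg =>
      rw [pvInnerA, dif_neg hjlt, pvBestIn, dif_neg (by omega)]
      rfl
    case pos =>
    by_cases hgap : dates.getD j 0 - dates.getD (j-1) 0 ≤ maxdiff
    case neg =>
      rw [pvInnerA, dif_pos hjlt]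
      simp only [pvSliceN_last dates i j hij (le_of_lt hjlt), Option.getD_some]
      rw [if_neg hgap, pvBestIn, dif_neg (by intro hc; exact hgap hc.2)]
      rfl
    case pos =>
      have hj1 : j + 1 - i = j - i + 1 := by omega
      have hstep : pvInnerA dates m n o maxdiff j (pvSliceN dates i j) d
          = pvInnerA dates m n o maxdiff (j+1) (pvSliceN dates i (j+1))
              (if (o ≤ ((j - i + 1 : Nat) : Int) ∧
                   m ≤ PySem.Int.floordiv (dates.getD j 0 - dates.getD i 0) 365 ∧
                   PySem.Int.floordiv (dates.getD j 0 - dates.getD i 0) 365 < n)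
               then pvUpd dates i j d else d) := by
        rw [pvInnerA, dif_pos hjlt]
        simp only [pvSliceN_last dates i j hij (le_of_lt hjlt), Option.getD_some]
        rw [if_pos hgap]
        simp only [pvSliceN_snoc dates i j (by omega) hjlt]
        congr 1
        have hiff : (o ≤ ((pvSliceN dates i (j+1)).length : Int) ∧ pvValidA m n (pvSliceN dates i (j+1)) = true)
            ↔ (o ≤ ((j - i + 1 : Nat) : Int) ∧
               m ≤ PySem.Int.floordiv (dates.getD j 0 - dates.getD i 0) 365 ∧
               PySem.Int.floordiv (dates.getD j 0 - dates.getD i 0) 365 < n) := by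
          unfold pvValidA
          rw [pvSliceN_len dates i (j+1) (by omega),
              pvSliceN_last dates i (j+1) (by omega) (by omega),
              pvSliceN_head dates i (j+1) (by omega) (by omega), hj1]
          simp only [Option.getD_some, Nat.add_sub_cancel, decide_eq_true_eq]
        by_cases hok : (o ≤ ((j - i + 1 : Nat) : Int) ∧
            m ≤ PySem.Int.floordiv (dates.getD j 0 - dates.getD i 0) 365 ∧
            PySem.Int.floordiv (dates.getD j 0 - dates.getD i 0) 365 < n)
        · rw [if_pos (hiff.mpr hok), if_pos hok]
          rw [pvSliceN_head dates i (j+1) (by omega) (by omega)]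
          simp only [Option.getD_some]
          rfl
        · rw [if_neg (fun hc => hok (hiff.mp hc)), if_neg hok]
      rw [hstep, ih (j+1) _ (by omega) (by omega) (by omega)]
      conv_rhs => rw [pvBestIn]
      rw [dif_pos ⟨hjlt, hgap⟩]
      cases hb : pvBestIn dates m n o maxdiff i (j+1) with
      | some j' =>
        by_cases hok : (o ≤ ((j - i + 1 : Nat) : Int) ∧
            m ≤ PySem.Int.floordiv (dates.getD j 0 - dates.getD i 0) 365 ∧
            PySem.Int.floordiv (dates.getD j 0 - dates.getD i 0) 365 < n)
        · rw [if_pos hok]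
          obtain ⟨h1, h2⟩ := pvBestIn_some dates m n o maxdiff i (j+1) j' hb
          exact pvUpd_upd dates d i j j' (by omega) (by omega) h2
        · rw [if_neg hok]
      | none =>
        by_cases hok : (o ≤ ((j - i + 1 : Nat) : Int) ∧
            m ≤ PySem.Int.floordiv (dates.getD j 0 - dates.getD i 0) 365 ∧
            PySem.Int.floordiv (dates.getD j 0 - dates.getD i 0) 365 < n)
        · rw [if_pos hok, if_pos hok]
          rfl
        · rw [if_neg hok, if_neg hok]
lemma pvRunEnd_facts (dates : List Int) (maxdiff : Int) (i : Nat) :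
    i ≤ pvRunEnd dates maxdiff i ∧
    (i < dates.length → pvRunEnd dates maxdiff i < dates.length) ∧
    (∀ k, i ≤ k → k < pvRunEnd dates maxdiff i →
      dates.getD (k+1) 0 - dates.getD k 0 ≤ maxdiff) ∧
    ¬ (pvRunEnd dates maxdiff i + 1 < dates.length ∧
       dates.getD (pvRunEnd dates maxdiff i + 1) 0 - dates.getD (pvRunEnd dates maxdiff i) 0 ≤ maxdiff) := by
  suffices H : ∀ fuel i, dates.length - i ≤ fuel →
      i ≤ pvRunEnd dates maxdiff i ∧
      (i < dates.length → pvRunEnd dates maxdiff i < dates.length) ∧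
      (∀ k, i ≤ k → k < pvRunEnd dates maxdiff i →
        dates.getD (k+1) 0 - dates.getD k 0 ≤ maxdiff) ∧
      ¬ (pvRunEnd dates maxdiff i + 1 < dates.length ∧
         dates.getD (pvRunEnd dates maxdiff i + 1) 0 - dates.getD (pvRunEnd dates maxdiff i) 0 ≤ maxdiff) by
    exact H dates.length i (by omega)
  intro fuel
  induction fuel with
  | zero =>
    intro i hf
    rw [pvRunEnd, dif_neg (fun hc => by omega)]
    exact ⟨le_refl _, fun h => h, fun k hk1 hk2 => by omega,
      fun hc => by omega⟩
  | succ f ih =>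
    intro i hf
    by_cases hc : i + 1 < dates.length ∧ dates.getD (i+1) 0 - dates.getD i 0 ≤ maxdiff
    · rw [pvRunEnd, dif_pos hc]
      obtain ⟨ha, hb', hchain, hmax⟩ := ih (i+1) (by omega)
      refine ⟨by omega, fun _ => hb' (by omega), ?_, hmax⟩
      intro k hk1 hk2
      rcases Nat.eq_or_lt_of_le hk1 with he | hlt
      · exact he ▸ hc.2
      · exact hchain k (by omega) hk2
    · rw [pvRunEnd, dif_neg hc]
      exact ⟨le_refl _, fun h => h, fun k hk1 hk2 => by omega, hc⟩

lemma pvScanB_step (dates : List Int) (m n : Int) (i : Nat) (j e : Int) (hje : j ≤ e) :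
    pvScanB dates m n i j e
      = match pvScanB dates m n i (j+1) e with
        | some x => some x
        | none =>
          if m ≤ PySem.Int.floordiv (dates.getD j.toNat 0 - dates.getD i 0) 365 ∧
             PySem.Int.floordiv (dates.getD j.toNat 0 - dates.getD i 0) 365 < n
          then some j else none := by
  suffices H : ∀ fuel (e : Int), j ≤ e → (e - j).toNat ≤ fuel →
      pvScanB dates m n i j e
        = match pvScanB dates m n i (j+1) e with
          | some x => some x
          | none =>
            if m ≤ PySem.Int.floordiv (dates.getD j.toNat 0 - dates.getD i 0) 365 ∧
               PySem.Int.floordiv (dates.getD j.toNat 0 - dates.getD i 0) 365 < n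
            then some j else none by
    exact H (e - j).toNat e hje (le_refl _)
  intro fuel
  induction fuel with
  | zero =>
    intro e h1 h2
    have he : e = j := by omega
    subst he
    conv_rhs => rw [pvScanB, dif_neg (by omega : ¬ (e + 1 ≤ e))]
    rw [pvScanB, dif_pos (le_refl e)]
    by_cases hv : m ≤ PySem.Int.floordiv (dates.getD e.toNat 0 - dates.getD i 0) 365 ∧
        PySem.Int.floordiv (dates.getD e.toNat 0 - dates.getD i 0) 365 < n
    · rw [if_pos hv]
      show some e = if m ≤ PySem.Int.floordiv (dates.getD e.toNat 0 - dates.getD i 0) 365 ∧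
          PySem.Int.floordiv (dates.getD e.toNat 0 - dates.getD i 0) 365 < n then some e else none
      rw [if_pos hv]
    · rw [if_neg hv, if_neg hv, pvScanB, dif_neg (by omega : ¬ (e ≤ e - 1))]
  | succ f ih =>
    intro e h1 h2
    by_cases hef : (e - j).toNat ≤ f
    · exact ih e h1 hef
    · have hgt : j < e := by omega
      conv_rhs => rw [pvScanB, dif_pos (by omega : j + 1 ≤ e)]
      rw [pvScanB, dif_pos h1]
      by_cases hv : m ≤ PySem.Int.floordiv (dates.getD e.toNat 0 - dates.getD i 0) 365 ∧
          PySem.Int.floordiv (dates.getD e.toNat 0 - dates.getD i 0) 365 < n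
      · rw [if_pos hv, if_pos hv]
      · rw [if_neg hv, if_neg hv]
        exact ih (e-1) (by omega) (by omega)

lemma pvBestIn_eq_scan (dates : List Int) (m n o maxdiff : Int) (i : Nat) (hi : i < dates.length) :
    ∀ j, i < j → j ≤ pvRunEnd dates maxdiff i + 1 →
    (pvBestIn dates m n o maxdiff i j).map (fun x => ((x : Nat) : Int))
      = pvScanB dates m n i (max (j : Int) ((i : Int) + max o 2 - 1)) ((pvRunEnd dates maxdiff i : Nat) : Int) := by
  obtain ⟨hge, hlt, hchain, hmax⟩ := pvRunEnd_facts dates maxdiff i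
  set E := pvRunEnd dates maxdiff i with hE
  have hEL : E < dates.length := hlt hi
  suffices H : ∀ fuel j, i < j → j ≤ E + 1 → E + 1 - j ≤ fuel →
      (pvBestIn dates m n o maxdiff i j).map (fun x => ((x : Nat) : Int))
        = pvScanB dates m n i (max (j : Int) ((i : Int) + max o 2 - 1)) ((E : Nat) : Int) by
    exact fun j h1 h2 => H (E + 1 - j) j h1 h2 (le_refl _)
  intro fuel
  induction fuel with
  | zero =>
    intro j h1 h2 hf
    have hj : j = E + 1 := by omega
    subst hj
    rw [pvBestIn, dif_neg (by simpa [Nat.add_sub_cancel] using hmax),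
        pvScanB, dif_neg (by omega : ¬ (max ((E + 1 : Nat) : Int) ((i : Int) + max o 2 - 1) ≤ ((E : Nat) : Int)))]
    rfl
  | succ f ih =>
    intro j h1 h2 hf
    by_cases hjf : E + 1 - j ≤ f
    · exact ih j h1 h2 hjf
    · have hjE : j ≤ E := by omega
      have hcond : j < dates.length ∧ dates.getD j 0 - dates.getD (j-1) 0 ≤ maxdiff := by
        refine ⟨by omega, ?_⟩
        have := hchain (j-1) (by omega) (by omega)
        have hjj : j - 1 + 1 = j := by omega
        rwa [hjj] at this
      rw [pvBestIn, dif_pos hcond]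
      have hih := ih (j+1) (by omega) (by omega) (by omega)
      -- scan-side step identity at lower bound j
      by_cases hjt : (j : Int) < (i : Int) + max o 2 - 1
      · -- below threshold: the length test fails at j, and both maxes are the threshold
        have hmj : max (j : Int) ((i : Int) + max o 2 - 1) = (i : Int) + max o 2 - 1 := by omega
        have hmj1 : max ((j + 1 : Nat) : Int) ((i : Int) + max o 2 - 1) = (i : Int) + max o 2 - 1 := by
          push_cast; omega
        rw [hmj]
        rw [hmj1] at hih
        have hnok : ¬ (o ≤ ((j - i + 1 : Nat) : Int) ∧
            m ≤ PySem.Int.floordiv (dates.getD j 0 - dates.getD i 0) 365 ∧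
            PySem.Int.floordiv (dates.getD j 0 - dates.getD i 0) 365 < n) := by
          intro hok
          have : ((j - i + 1 : Nat) : Int) < max o 2 := by push_cast; omega
          have h2o : (2 : Int) ≤ ((j - i + 1 : Nat) : Int) := by push_cast; omega
          omega
        cases hb : pvBestIn dates m n o maxdiff i (j+1) with
        | some j' =>
          rw [hb] at hih
          simp only [Option.map_some] at hih
          simp only [Option.map_some, ← hih]
        | none =>
          rw [hb] at hih
          simp only [Option.map_none] at hih
          rw [if_neg hnok]
          simpa using hih.symm ▸ hih
      · -- at or above threshold: peel one step off the scan
        have hmj : max (j : Int) ((i : Int) + max o 2 - 1) = (j : Int) := by omega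
        have hmj1 : max ((j + 1 : Nat) : Int) ((i : Int) + max o 2 - 1) = ((j : Int) + 1) := by
          push_cast; omega
        rw [hmj]
        rw [hmj1] at hih
        rw [pvScanB_step dates m n i (j : Int) ((E : Nat) : Int) (by omega)]
        rw [← hih]
        have htn : ((j : Int)).toNat = j := by omega
        rw [htn]
        cases hb : pvBestIn dates m n o maxdiff i (j+1) with
        | some j' => simp
        | none =>
          simp only [Option.map_none]
          by_cases hv : m ≤ PySem.Int.floordiv (dates.getD j 0 - dates.getD i 0) 365 ∧
              PySem.Int.floordiv (dates.getD j 0 - dates.getD i 0) 365 < n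
          · rw [if_pos ⟨by push_cast; omega, hv⟩]
            show Option.map _ (some j) = if _ then _ else _
            rw [if_pos hv]
            rfl
          · rw [if_neg (fun hok => hv hok.2)]
            show (none : Option Int) = if _ then some ((j : Nat) : Int) else none
            rw [if_neg hv]
lemma pvSliceN_single (dates : List Int) (i : Nat) (hi : i < dates.length) :
    [dates.getD i 0] = pvSliceN dates i (i+1) := by
  have h1 : i + 1 - i = 1 := by omega
  rw [pvSliceN, h1, List.drop_eq_getElem_cons hi, List.take_succ_cons, List.take_zero]
  simp [List.getD_eq_getElem?_getD, List.getElem?_eq_getElem hi]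

lemma pvBody_eq (dates : List Int) (m n o maxdiff : Int) (i : Nat) (hi : i < dates.length)
    (d : PySem.Dict Int (List Int)) :
    pvInnerA dates m n o maxdiff (i+1) [dates.getD i 0] d
      = (match pvScanB dates m n i ((i : Int) + max o 2 - 1) ((pvRunEnd dates maxdiff i : Nat) : Int) with
        | some j =>
          let start := dates.getD i 0
          let cand := PySem.List.slice dates (some (i : Int)) (some (j + 1))
          match d.get? start with
          | some v => if (v.length : Int) < j - (i : Int) + 1 then d.insert start cand else d
          | none => d.insert start cand
        | none => d) := by
  obtain ⟨hge, hlt, _, _⟩ := pvRunEnd_facts dates maxdiff i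
  have hEL : pvRunEnd dates maxdiff i < dates.length := hlt hi
  have hmax1 : max ((i + 1 : Nat) : Int) ((i : Int) + max o 2 - 1) = (i : Int) + max o 2 - 1 := by
    push_cast; omega
  have hscan := pvBestIn_eq_scan dates m n o maxdiff i hi (i+1) (by omega) (by omega)
  rw [hmax1] at hscan
  rw [pvSliceN_single dates i hi,
      pvInnerA_eq dates m n o maxdiff i (i+1) d (by omega) (by omega), ← hscan]
  cases hb : pvBestIn dates m n o maxdiff i (i+1) with
  | none => rfl
  | some j' =>
    simp only [Option.map_some]
    obtain ⟨hj1, hj2⟩ := pvBestIn_some dates m n o maxdiff i (i+1) j' hb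
    show pvUpd dates i j' d = _
    have hcand : PySem.List.slice dates (some (i : Int)) (some (((j' : Nat) : Int) + 1))
        = pvSliceN dates i (j'+1) := by
      have : (((j' : Nat) : Int) + 1) = ((j' + 1 : Nat) : Int) := by push_cast; ring
      rw [this, PySem.List.slice_natCast]
      rfl
    have hlen : (pvSliceN dates i (j'+1)).length = j' + 1 - i := pvSliceN_len dates i (j'+1) (by omega)
    rw [pvUpd]
    cases hg : d.get? (dates.getD i 0) with
    | none =>
      show _ = d.insert (dates.getD i 0) (PySem.List.slice dates (some (i : Int)) (some (((j' : Nat) : Int) + 1)))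
      rw [hcand]
    | some v =>
      show (if v.length < (pvSliceN dates i (j'+1)).length then _ else d)
        = (if ((v.length : Nat) : Int) < ((j' : Nat) : Int) - (i : Int) + 1 then
             d.insert (dates.getD i 0) (PySem.List.slice dates (some (i : Int)) (some (((j' : Nat) : Int) + 1))) else d)
      rw [hcand]
      by_cases hvl : v.length < (pvSliceN dates i (j'+1)).length
      · rw [if_pos hvl, if_pos (by rw [hlen] at hvl; omega)]
      · rw [if_neg hvl, if_neg (by rw [hlen] at hvl; omega)]

-- ===== VERDICT (by name: the statement is the Claim_ definition above) =====
theorem extract_intervals_spec : Claim_equal_extract_intervals := by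
  intro dates m n o maxdiff _
  unfold Spec_extract_intervals extract_intervals extract_intervals_alt
  refine congrArg _ ?_
  refine PySem.List.foldl_congr_mem _ _ _ _ (fun d i hi => ?_)
  exact pvBody_eq dates m n o maxdiff i (List.mem_range.mp hi) d
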